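-- pv_equiv track=rewrite | github.com/noahp/adventofcode | 2023/03/aoc.py | line_parse_digit_groups
-- ===== SOURCE A (Python) =====
-- def line_parse_digit_groups(line):
--     # for each line, create a list that's indexed by offset into the line, and
--     # if there's a digit group containing that offset, the number in the group
--     # is stored in the list at that offset.
--     # example:
--     # line = "1..23"
--     # result = [1, None, None, 23, 23]
--     offset_to_number = []
--     current_digit_group = []
--     for i in range(len(line)):
--         if line[i].isdigit():
--             current_digit_group.append(line[i])
--         else:
--             if len(current_digit_group) > 0:
--                 for j in range(len(current_digit_group)):
--                     offset_to_number.append(int("".join(current_digit_group)))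
--                 current_digit_group = []
--             offset_to_number.append(None)
--     # end of line, check if there's a digit group
--     if len(current_digit_group) > 0:
--         for j in range(len(current_digit_group)):
--             offset_to_number.append(int("".join(current_digit_group)))
--
--     return offset_to_number
-- ===== SOURCE B (Python) =====
-- def line_parse_digit_groups(line):
--     # Run-oriented scan: two pointers find each maximal run of same-class
--     # (digit / non-digit) characters; a digit run is converted once via a
--     # slice and the result extended in one block per run.
--     result = []
--     i, n = 0, len(line)
--     while i < n:
--         d = line[i].isdigit()
--         j = i + 1
--         while j < n and line[j].isdigit() == d:
--             j += 1
--         if d: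
--             result.extend([int(line[i:j])] * (j - i))
--         else:
--             result.extend([None] * (j - i))
--         i = j
--     return result
-- ===== Notes on version B (the rewrite author's own statement) =====
-- stated objective: alternative
-- what changed: Replaced A's per-offset state machine with a pending digit buffer (flushed at each non-digit and at end of line) by a two-pointer scan over maximal same-class runs: each digit run is converted once from a slice and each run's output is emitted as one extend block.
import Mathlib
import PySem

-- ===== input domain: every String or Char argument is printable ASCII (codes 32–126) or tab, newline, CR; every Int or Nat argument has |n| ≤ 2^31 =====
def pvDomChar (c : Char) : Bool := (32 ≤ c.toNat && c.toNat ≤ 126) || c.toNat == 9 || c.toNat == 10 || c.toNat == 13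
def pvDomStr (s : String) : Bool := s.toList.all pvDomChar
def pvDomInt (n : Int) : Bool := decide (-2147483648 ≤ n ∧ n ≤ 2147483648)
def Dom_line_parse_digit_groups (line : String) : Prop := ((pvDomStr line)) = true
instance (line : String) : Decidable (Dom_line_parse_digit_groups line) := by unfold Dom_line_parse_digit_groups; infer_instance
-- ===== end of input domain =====

-- B replaces A's per-offset state machine (pending digit buffer, flushed at each
-- non-digit and at end of line) with a two-pointer scan over maximal same-class runs,
-- converting each digit run once and emitting each run's output as one block (objective: alternative).

-- ===== PORT A =====
-- A's for-loop over offsets, carried as structural recursion over the characters with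
-- the same state (offset_to_number accumulator `acc`, current_digit_group `grp`).
-- `int("".join(grp))` is ported as `PySem.Int.ofChars? grp`, used directly as the
-- Option Int list element: it is flushed only when grp is a nonempty list of digit
-- characters, where int() returns (some value) and never raises.
def aGo : List Char → List (Option Int) → List Char → List (Option Int)
  | [], acc, grp =>
      -- end of line, check if there's a digit group
      if grp.length > 0 then
        acc ++ List.replicate grp.length (PySem.Int.ofChars? grp)
      else acc
  | c :: rest, acc, grp =>
      if PySem.Chars.isdigit c then
        aGo rest acc (grp ++ [c])
      else
        if grp.length > 0 then
          aGo rest ((acc ++ List.replicate grp.length (PySem.Int.ofChars? grp)) ++ [none]) []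
        else
          aGo rest (acc ++ [none]) grp

def line_parse_digit_groups (line : String) : List (Option Int) :=
  aGo line.toList [] []

-- ===== PORT B =====
-- B's outer while loop = recursion on the remaining characters; the inner `j` scan
-- = takeWhile/dropWhile with the same predicate `line[j].isdigit() == d`;
-- each run emits one block (replicate), digit runs converted once from the slice.
def bGo (cs : List Char) : List (Option Int) :=
  match cs with
  | [] => []
  | c :: rest =>
      let d := PySem.Chars.isdigit c
      let run := c :: rest.takeWhile (fun x => PySem.Chars.isdigit x == d)
      let rest' := rest.dropWhile (fun x => PySem.Chars.isdigit x == d)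
      (if d then List.replicate run.length (PySem.Int.ofChars? run)
       else List.replicate run.length none) ++ bGo rest'
termination_by cs.length
decreasing_by
  simpa using Nat.lt_succ_of_le (List.length_dropWhile_le _ _)

def line_parse_digit_groups_alt (line : String) : List (Option Int) :=
  bGo line.toList

-- ===== PRECONDITION & SPEC =====
def Spec_line_parse_digit_groups (line : String) (out : List (Option Int)) : Prop := out = line_parse_digit_groups_alt line
instance (line : String) (out : List (Option Int)) : Decidable (Spec_line_parse_digit_groups line out) := by unfold Spec_line_parse_digit_groups; infer_instance

-- ===== CLAIM (what is proved, stated in full; the proofs are below) =====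
def Claim_equal_line_parse_digit_groups : Prop := ∀ (line : String), Dom_line_parse_digit_groups line → Spec_line_parse_digit_groups line (line_parse_digit_groups line)

-- ===== LEMMAS AND PROOFS =====

-- prepending a non-digit char contributes exactly one `none`
lemma bGo_nondigit_cons (c : Char) (cs : List Char)
    (hc : PySem.Chars.isdigit c = false) :
    bGo (c :: cs) = none :: bGo cs := by
  cases cs with
  | nil => simp [bGo, hc]
  | cons c' cs' =>
      cases hb : PySem.Chars.isdigit c' <;>
        simp [bGo, hc, hb, List.replicate_succ]

-- a nonempty all-digit prefix followed by [] or a non-digit head is exactly one run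
lemma bGo_digit_prefix (grp cs : List Char)
    (hne : grp ≠ [])
    (hdig : ∀ x ∈ grp, PySem.Chars.isdigit x = true)
    (hcs : cs = [] ∨ ∃ c cs', cs = c :: cs' ∧ PySem.Chars.isdigit c = false) :
    bGo (grp ++ cs) = List.replicate grp.length (PySem.Int.ofChars? grp) ++ bGo cs := by
  cases grp with
  | nil => exact absurd rfl hne
  | cons g gs =>
      have hg : PySem.Chars.isdigit g = true := hdig g (by simp)
      have hgs : ∀ x ∈ gs, PySem.Chars.isdigit x = true := fun x hx => hdig x (by simp [hx])
      have hbase : cs.takeWhile (fun x => PySem.Chars.isdigit x) = [] ∧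
          cs.dropWhile (fun x => PySem.Chars.isdigit x) = cs := by
        rcases hcs with rfl | ⟨c, cs', rfl, hc⟩
        · simp
        · simp [hc]
      have htd : ∀ l : List Char, (∀ x ∈ l, PySem.Chars.isdigit x = true) →
          (l ++ cs).takeWhile (fun x => PySem.Chars.isdigit x) = l ∧
          (l ++ cs).dropWhile (fun x => PySem.Chars.isdigit x) = cs := by
        intro l
        induction l with
        | nil => intro _; simpa using hbase
        | cons a as ihl =>
            intro h
            obtain ⟨h1, h2⟩ := ihl (fun x hx => h x (by simp [hx]))
            simp [h a (by simp), h1, h2]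
      obtain ⟨h1, h2⟩ := htd gs hgs
      rw [List.cons_append]
      simp [bGo, hg, h1, h2]

-- main invariant: running A's state machine with pending digit group `grp`
-- computes `acc ++` B's run decomposition of `grp ++ cs`.
lemma aGo_eq (cs : List Char) : ∀ (acc : List (Option Int)) (grp : List Char),
    (∀ x ∈ grp, PySem.Chars.isdigit x = true) →
    aGo cs acc grp = acc ++ bGo (grp ++ cs) := by
  induction cs with
  | nil =>
      intro acc grp hdig
      by_cases hne : grp = []
      · subst hne; simp [aGo, bGo]
      · have hlen : grp.length > 0 := List.length_pos_iff.mpr hne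
        rw [aGo, if_pos hlen, bGo_digit_prefix grp [] hne hdig (Or.inl rfl)]
        simp [bGo]
  | cons c rest ih =>
      intro acc grp hdig
      by_cases hc : PySem.Chars.isdigit c = true
      · rw [aGo, if_pos hc, ih acc (grp ++ [c])
            (by intro x hx; rcases List.mem_append.mp hx with h | h
                · exact hdig x h
                · simp at h; subst h; exact hc)]
        simp
      · simp only [Bool.not_eq_true] at hc
        rw [aGo, hc]
        simp only [Bool.false_eq_true, if_false]
        by_cases hne : grp = []
        · subst hne
          rw [if_neg (by simp), ih (acc ++ [none]) [] (by intro x hx; simp at hx)]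
          rw [List.nil_append, List.nil_append, bGo_nondigit_cons c rest hc]
          simp
        · have hlen : grp.length > 0 := List.length_pos_iff.mpr hne
          rw [if_pos hlen, ih _ [] (by intro x hx; simp at hx)]
          rw [List.nil_append,
            bGo_digit_prefix grp (c :: rest) hne hdig (Or.inr ⟨c, rest, rfl, hc⟩),
            bGo_nondigit_cons c rest hc]
          simp

-- ===== VERDICT (by name: the statement is the Claim_ definition above) =====
theorem line_parse_digit_groups_spec : Claim_equal_line_parse_digit_groups := by
  intro line _
  unfold Spec_line_parse_digit_groups line_parse_digit_groups line_parse_digit_groups_alt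
  rw [aGo_eq line.toList [] [] (by intro x hx; simp at hx)]
  simp
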